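-- pv_equiv track=rewrite | github.com/lilsweetcaligula/Online-Judges | hackerrank/algorithms/strings/easy/the_love_letter_mystery/py/solution.py | solution
-- ===== SOURCE A (Python) =====
-- def solution(s):
--     chars = list(s)
--     count = 0
--     i     = 0
--     j     = len(chars) - 1
--
--     while i < j:
--         while chars[i] != chars[j]:
--             if chars[i] < chars[j]:
--                 chars[i] = chr(ord(chars[i]) + 1)
--             else:
--                 chars[j] = chr(ord(chars[j]) + 1)
--             count += 1
--         i += 1
--         j -= 1
--
--     return count
-- ===== SOURCE B (Python) =====
-- def solution(s):
--     return sum(abs(ord(s[i]) - ord(s[len(s) - 1 - i])) for i in range(len(s) // 2))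
-- ===== Notes on version B (the rewrite author's own statement) =====
-- stated objective: faster
-- what changed: Replaces A's inner character-by-character increment loop (which runs |ord difference| times per mirrored pair while mutating a char list) with a closed-form sum of absolute ord differences over the mirrored pairs.
import Mathlib
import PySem

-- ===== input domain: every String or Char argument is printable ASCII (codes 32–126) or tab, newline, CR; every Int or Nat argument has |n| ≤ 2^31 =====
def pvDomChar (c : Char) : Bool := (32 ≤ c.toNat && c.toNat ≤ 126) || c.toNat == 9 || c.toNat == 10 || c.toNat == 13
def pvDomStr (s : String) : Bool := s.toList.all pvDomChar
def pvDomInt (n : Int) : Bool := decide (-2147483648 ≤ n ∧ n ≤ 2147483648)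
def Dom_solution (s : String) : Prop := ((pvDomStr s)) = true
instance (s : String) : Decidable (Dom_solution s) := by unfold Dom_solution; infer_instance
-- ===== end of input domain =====

-- B replaces A's inner character-by-character increment loop with a closed-form sum of
-- absolute ord differences over mirrored pairs (objective: faster). A mutates only its
-- local char list, so there is no observable side effect to match.

-- needed by solInner's termination proof (cited there by name)
theorem natAbs_dec_left (f g : Nat) (h : f < g) :
    ((↑(f + 1) : Int) - ↑g).natAbs < ((f : Int) - ↑g).natAbs := by omega

theorem natAbs_dec_right (f g : Nat) (h : g < f) :
    ((f : Int) - ↑(g + 1)).natAbs < ((f : Int) - ↑g).natAbs := by omega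

theorem charOfNat_toNat {n : Nat} (h : n.isValidChar) : (Char.ofNat n).toNat = n := by
  simp only [Char.ofNat, dif_pos h, Char.ofNatAux, Char.toNat]
  rfl

-- ===== PORT A =====
-- Inner 'while chars[i] != chars[j]' loop of A.  The conjuncts after the inequality are
-- totality guards only (index in range, code points below the surrogate block so that
-- chr(ord(c)+1) is a valid Char): they always hold on the admitted inputs when called
-- from solOuter, where Python's loop also runs without error.
def solInner (chars : List Char) (i j : Nat) (count : Int) : List Char × Int :=
  if h : chars.getD i ' ' ≠ chars.getD j ' ' ∧ i < j ∧ j < chars.length ∧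
         (chars.getD i ' ').toNat < 55296 ∧ (chars.getD j ' ').toNat < 55296 then
    if chars.getD i ' ' < chars.getD j ' ' then
      solInner (chars.set i (Char.ofNat ((chars.getD i ' ').toNat + 1))) i j (count + 1)
    else
      solInner (chars.set j (Char.ofNat ((chars.getD j ' ').toNat + 1))) i j (count + 1)
  else (chars, count)
termination_by (((chars.getD i ' ').toNat : Int) - ((chars.getD j ' ').toNat : Int)).natAbs
decreasing_by
  · obtain ⟨hne, hij, hjl, hvi, hvj⟩ := h
    have hil : i < chars.length := Nat.lt_trans hij hjl
    have hlt : (chars.getD i ' ').toNat < (chars.getD j ' ').toNat := by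
      rename_i hc; rw [Char.lt_def, UInt32.lt_iff_toNat_lt] at hc; exact hc
    have hvalid : ((chars.getD i ' ').toNat + 1).isValidChar := Or.inl (by omega)
    have h1 : (chars.set i (Char.ofNat ((chars.getD i ' ').toNat + 1))).getD i ' '
        = Char.ofNat ((chars.getD i ' ').toNat + 1) := by
      simp [List.getD, hil]
    have h2 : (chars.set i (Char.ofNat ((chars.getD i ' ').toNat + 1))).getD j ' '
        = chars.getD j ' ' := by
      simp [List.getD, List.getElem?_set_ne (by omega : i ≠ j)]
    rw [h1, h2, charOfNat_toNat hvalid]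
    exact natAbs_dec_left _ _ hlt
  · obtain ⟨hne, hij, hjl, hvi, hvj⟩ := h
    have eI : (chars.getD i ' ').toNat = (chars.getD i ' ').val.toNat := rfl
    have eJ : (chars.getD j ' ').toNat = (chars.getD j ' ').val.toNat := rfl
    have hlt : (chars.getD j ' ').toNat < (chars.getD i ' ').toNat := by
      rename_i hc
      rw [Char.lt_def, UInt32.lt_iff_toNat_lt] at hc
      have : (chars.getD i ' ').toNat ≠ (chars.getD j ' ').toNat := by
        intro he; exact hne (Char.ext (UInt32.toNat_inj.mp he))
      omega
    have hvalid : ((chars.getD j ' ').toNat + 1).isValidChar := Or.inl (by omega)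
    have h1 : (chars.set j (Char.ofNat ((chars.getD j ' ').toNat + 1))).getD j ' '
        = Char.ofNat ((chars.getD j ' ').toNat + 1) := by
      simp [List.getD, hjl]
    have h2 : (chars.set j (Char.ofNat ((chars.getD j ' ').toNat + 1))).getD i ' '
        = chars.getD i ' ' := by
      simp [List.getD, List.getElem?_set_ne (by omega : j ≠ i)]
    rw [h1, h2, charOfNat_toNat hvalid]
    exact natAbs_dec_right _ _ hlt

-- Outer 'while i < j' loop of A.
def solOuter (chars : List Char) (i j : Int) (count : Int) : Int :=
  if h : i < j then
    let p := solInner chars i.toNat j.toNat count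
    solOuter p.1 (i + 1) (j - 1) p.2
  else count
termination_by (j - i).toNat
decreasing_by omega

def solution (s : String) : Int :=
  solOuter s.toList 0 ((s.toList.length : Int) - 1) 0

-- ===== PORT B =====
-- sum(abs(ord(s[i]) - ord(s[len(s)-1-i])) for i in range(len(s)//2)); both indices are
-- always in range for i < len//2, so getD is exact here.
def solution_alt (s : String) : Int :=
  ((List.range (s.toList.length / 2)).map (fun i =>
    (((((s.toList.getD i ' ').toNat : Int)
       - ((s.toList.getD (s.toList.length - 1 - i) ' ').toNat : Int)).natAbs : Int)))).sum

-- ===== PRECONDITION & SPEC =====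
def Spec_solution (s : String) (out : Int) : Prop := out = solution_alt s
instance (s : String) (out : Int) : Decidable (Spec_solution s out) := by unfold Spec_solution; infer_instance

-- ===== CLAIM (what is proved, stated in full; the proofs are below) =====
def Claim_equal_solution : Prop := ∀ (s : String), Dom_solution s → Spec_solution s (solution s)

-- ===== LEMMAS AND PROOFS =====

theorem char_toNat_injective {a b : Char} (h : a.toNat = b.toNat) : a = b :=
  Char.ext (UInt32.toNat_inj.mp h)

theorem char_lt_toNat {a b : Char} : a < b ↔ a.toNat < b.toNat := by
  rw [Char.lt_def, UInt32.lt_iff_toNat_lt]; exact Iff.rfl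

-- What the inner loop computes: it adds the absolute ord difference of the pair to count
-- and only changes positions i and j, preserving length and code-point validity.
theorem inner_spec : ∀ (d : Nat) (chars : List Char) (i j : Nat) (count : Int),
    i < j → j < chars.length → (∀ c ∈ chars, c.toNat < 55296) →
    (((chars.getD i ' ').toNat : Int) - ((chars.getD j ' ').toNat : Int)).natAbs = d →
    ∃ chars', solInner chars i j count = (chars', count + (d : Int)) ∧
      chars'.length = chars.length ∧
      (∀ k, k ≠ i → k ≠ j → chars'.getD k ' ' = chars.getD k ' ') ∧
      (∀ c ∈ chars', c.toNat < 55296) := by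
  intro d
  induction d with
  | zero =>
    intro chars i j count hij hjl hval hd
    have heq : chars.getD i ' ' = chars.getD j ' ' :=
      char_toNat_injective (by omega)
    refine ⟨chars, ?_, rfl, fun _ _ _ => rfl, hval⟩
    rw [solInner, dif_neg (fun hcon => hcon.1 heq)]
    simp
  | succ d ih =>
    intro chars i j count hij hjl hval hd
    have hil : i < chars.length := Nat.lt_trans hij hjl
    have hvi : (chars.getD i ' ').toNat < 55296 := by
      refine hval _ ?_
      rw [List.getD_eq_getElem?_getD, List.getElem?_eq_getElem hil]
      exact List.getElem_mem hil
    have hvj : (chars.getD j ' ').toNat < 55296 := by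
      refine hval _ ?_
      rw [List.getD_eq_getElem?_getD, List.getElem?_eq_getElem hjl]
      exact List.getElem_mem hjl
    have hne : chars.getD i ' ' ≠ chars.getD j ' ' := by
      intro he; rw [he] at hd; simp at hd
    by_cases hlt : chars.getD i ' ' < chars.getD j ' '
    · have hltN : (chars.getD i ' ').toNat < (chars.getD j ' ').toNat :=
        char_lt_toNat.mp hlt
      set c' := Char.ofNat ((chars.getD i ' ').toNat + 1) with hc'
      have hc't : c'.toNat = (chars.getD i ' ').toNat + 1 :=
        charOfNat_toNat (Or.inl (by omega))
      set chars2 := chars.set i c' with hch2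
      have h2i : chars2.getD i ' ' = c' := by
        simp [hch2, List.getD, hil]
      have h2j : chars2.getD j ' ' = chars.getD j ' ' := by
        simp [hch2, List.getD, List.getElem?_set_ne (by omega : i ≠ j)]
      have h2len : chars2.length = chars.length := by simp [hch2]
      have h2val : ∀ c ∈ chars2, c.toNat < 55296 := by
        intro c hc
        rcases List.mem_or_eq_of_mem_set hc with h | h
        · exact hval c h
        · rw [h, hc't]; omega
      obtain ⟨chars', hrun, hlen', hoff', hval'⟩ :=
        ih chars2 i j (count + 1) hij (by omega) h2val (by rw [h2i, h2j, hc't]; omega)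
      refine ⟨chars', ?_, by omega, ?_, hval'⟩
      · rw [solInner, dif_pos ⟨hne, hij, hjl, by omega, by omega⟩, if_pos hlt]
        rw [hrun]; congr 1; push_cast; ring
      · intro k hki hkj
        rw [hoff' k hki hkj, hch2]
        simp [List.getD, List.getElem?_set_ne (by omega : i ≠ k)]
    · have hltN : (chars.getD j ' ').toNat < (chars.getD i ' ').toNat := by
        rw [char_lt_toNat] at hlt
        have : (chars.getD i ' ').toNat ≠ (chars.getD j ' ').toNat := by
          intro he; exact hne (char_toNat_injective he)
        omega
      set c' := Char.ofNat ((chars.getD j ' ').toNat + 1) with hc'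
      have hc't : c'.toNat = (chars.getD j ' ').toNat + 1 :=
        charOfNat_toNat (Or.inl (by omega))
      set chars2 := chars.set j c' with hch2
      have h2j : chars2.getD j ' ' = c' := by
        simp [hch2, List.getD, hjl]
      have h2i : chars2.getD i ' ' = chars.getD i ' ' := by
        simp [hch2, List.getD, List.getElem?_set_ne (by omega : j ≠ i)]
      have h2val : ∀ c ∈ chars2, c.toNat < 55296 := by
        intro c hc
        rcases List.mem_or_eq_of_mem_set hc with h | h
        · exact hval c h
        · rw [h, hc't]; omega
      obtain ⟨chars', hrun, hlen', hoff', hval'⟩ :=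
        ih chars2 i j (count + 1) hij (by simp [hch2]; omega) h2val
          (by rw [h2i, h2j, hc't]; omega)
      refine ⟨chars', ?_, by simp [hch2] at hlen' ⊢; omega, ?_, hval'⟩
      · rw [solInner, dif_pos ⟨hne, hij, hjl, by omega, by omega⟩, if_neg hlt]
        rw [hrun]; congr 1; push_cast; ring
      · intro k hki hkj
        rw [hoff' k hki hkj, hch2]
        simp [List.getD, List.getElem?_set_ne (by omega : j ≠ k)]

-- What the outer loop computes, with m the number of remaining mirrored pairs: the k-th
-- pair read by later iterations is untouched by the inner loop's mutations.
theorem outer_spec : ∀ (m : Nat) (chars : List Char) (i j : Int) (count : Int),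
    0 ≤ i → j < (chars.length : Int) → (∀ c ∈ chars, c.toNat < 55296) →
    i + 2 * (m : Int) - 1 ≤ j → j ≤ i + 2 * (m : Int) →
    solOuter chars i j count = count + ((List.range m).map (fun k =>
      (((((chars.getD (i.toNat + k) ' ').toNat : Int)
        - ((chars.getD (j.toNat - k) ' ').toNat : Int)).natAbs : Int)))).sum := by
  intro m
  induction m with
  | zero =>
    intro chars i j count h0 hjl hval hlo hhi
    rw [solOuter, dif_neg (by omega)]
    simp
  | succ m ih =>
    intro chars i j count h0 hjl hval hlo hhi
    have hij : i < j := by push_cast at hlo; omega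
    have hj0 : 0 ≤ j := by push_cast at hlo; omega
    have hijN : i.toNat < j.toNat := by omega
    have hjlN : j.toNat < chars.length := by omega
    obtain ⟨chars', hrun, hlen', hoff', hval'⟩ :=
      inner_spec ((((chars.getD i.toNat ' ').toNat : Int)
        - ((chars.getD j.toNat ' ').toNat : Int)).natAbs) chars i.toNat j.toNat count
        hijN hjlN hval rfl
    rw [solOuter, dif_pos hij]
    simp only [hrun]
    rw [ih chars' (i + 1) (j - 1) _ (by omega) (by rw [hlen']; omega)
        hval' (by push_cast at hlo ⊢; omega) (by push_cast at hhi ⊢; omega)]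
    rw [List.range_succ_eq_map]
    simp only [List.map_cons, List.map_map, List.sum_cons]
    have hidx : ∀ k : Nat, k ∈ List.range m →
        ((((chars'.getD ((i+1).toNat + k) ' ').toNat : Int)
          - ((chars'.getD ((j-1).toNat - k) ' ').toNat : Int)).natAbs : Int)
        = ((fun k => (((((chars.getD (i.toNat + k) ' ').toNat : Int)
            - ((chars.getD (j.toNat - k) ' ').toNat : Int)).natAbs : Int))) ∘ (· + 1)) k := by
      intro k hk
      rw [List.mem_range] at hk
      have hlo' : i.toNat + 2 * m + 1 ≤ j.toNat := by push_cast at hlo; omega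
      have e1 : (i+1).toNat + k = i.toNat + (k + 1) := by omega
      have e2 : (j-1).toNat - k = j.toNat - (k + 1) := by omega
      rw [e1, e2,
        hoff' (i.toNat + (k + 1)) (by omega) (by omega),
        hoff' (j.toNat - (k + 1)) (by omega) (by omega)]
      rfl
    rw [List.map_congr_left hidx]
    simp only [Nat.sub_zero, Nat.add_zero]
    ring

theorem main_equiv (s : String) (hdom : Dom_solution s) :
    solution s = solution_alt s := by
  have hval : ∀ c ∈ s.toList, c.toNat < 55296 := by
    intro c hc
    have := List.all_eq_true.mp hdom c hc
    simp only [pvDomChar, Bool.or_eq_true, Bool.and_eq_true, decide_eq_true_eq,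
      beq_iff_eq] at this
    omega
  set L := s.toList.length with hL
  have h := outer_spec (L / 2) s.toList 0 ((L : Int) - 1) 0 (by omega)
    (by omega) hval (by omega) (by omega)
  unfold solution solution_alt
  rw [← hL, h]
  have e1 : ((L : Int) - 1).toNat = L - 1 := by omega
  simp only [Int.toNat_zero, e1, zero_add]

-- ===== VERDICT (by name: the statement is the Claim_ definition above) =====
theorem solution_spec : Claim_equal_solution := by
  intro s hdom
  unfold Spec_solution
  exact main_equiv s hdom
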